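-- pv_equiv track=rewrite | github.com/ailyedu2030/xiami-quant | policy_monitor.py | _calculate_direction
-- ===== SOURCE A (Python) =====
-- from typing import Dict, List
--
-- def _calculate_direction(sectors: List[Dict]) -> str:
--     """计算整体方向"""
--     if not sectors:
--         return "neutral"
--
--     positive = sum(1 for s in sectors if s["direction"] == "positive")
--     negative = sum(1 for s in sectors if s["direction"] == "negative")
--
--     if positive > negative:
--         return "positive"
--     elif negative > positive:
--         return "negative"
--     return "neutral"
-- ===== SOURCE B (Python) =====
-- def _calculate_direction(sectors):
--     """Pairwise-cancellation stack (Boyer-Moore majority style): a new signal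
--     annihilates an opposing signal on top of the stack; survivors decide."""
--     stack = []
--     for s in sectors:
--         d = s["direction"]
--         if d not in ("positive", "negative"):
--             continue
--         if stack and stack[-1] != d:
--             stack.pop()
--         else:
--             stack.append(d)
--     if not stack:
--         return "neutral"
--     return stack[-1]
-- ===== Notes on version B (the rewrite author's own statement) =====
-- stated objective: alternative
-- what changed: Replaces the two counting comprehensions and the count comparison by a Boyer-Moore-style pairwise-cancellation stack: each signal annihilates an opposing signal on top of the stack, and the surviving stack (all one kind) decides the direction; no counter exists anywhere.
import Mathlib
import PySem

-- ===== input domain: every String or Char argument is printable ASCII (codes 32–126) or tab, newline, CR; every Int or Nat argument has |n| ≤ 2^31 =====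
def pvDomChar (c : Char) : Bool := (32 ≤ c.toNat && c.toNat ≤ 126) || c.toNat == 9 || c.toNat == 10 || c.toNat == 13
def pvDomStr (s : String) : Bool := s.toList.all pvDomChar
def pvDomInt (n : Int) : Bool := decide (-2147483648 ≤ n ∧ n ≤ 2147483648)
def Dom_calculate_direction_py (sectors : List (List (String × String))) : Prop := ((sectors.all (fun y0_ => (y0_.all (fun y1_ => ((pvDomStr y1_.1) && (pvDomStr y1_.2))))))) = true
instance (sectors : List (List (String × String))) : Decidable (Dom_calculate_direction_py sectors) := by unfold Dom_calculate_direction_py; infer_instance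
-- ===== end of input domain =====

-- B replaces A's two counting passes by a pairwise-cancellation stack (Boyer-Moore majority style); no counter exists in B.

-- ===== PORT A =====
-- s["direction"] : first-match lookup in the association list; total under Pre_ (key present).
def pyDirD (s : List (String × String)) : String :=
  ((s.find? (fun kv => kv.1 == "direction")).map (·.2)).getD ""

def calculate_direction_py (sectors : List (List (String × String))) : String :=
  if sectors = [] then "neutral"
  else
    let positive : Int := (sectors.map (fun s => if pyDirD s == "positive" then (1:Int) else 0)).sum
    let negative : Int := (sectors.map (fun s => if pyDirD s == "negative" then (1:Int) else 0)).sum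
    if positive > negative then "positive"
    else if negative > positive then "negative"
    else "neutral"

-- ===== PORT B =====
-- Stack held top-at-head; Python's stack[-1]/pop/append become head/tail/cons.
def cdStep (st : List String) (s : List (String × String)) : List String :=
  let d := pyDirD s
  if d == "positive" || d == "negative" then
    match st with
    | [] => [d]
    | t :: rest => if (t == d) = false then rest else d :: t :: rest
  else st

def calculate_direction_py_alt (sectors : List (List (String × String))) : String :=
  let stack := sectors.foldl cdStep []
  match stack with
  | [] => "neutral"
  | t :: _ => t

-- ===== PRECONDITION & SPEC =====
-- Pre_ excludes exactly the inputs on which A (and B) raise KeyError: a sector with no "direction" key.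
def Pre_calculate_direction_py (sectors : List (List (String × String))) : Prop :=
  (sectors.all (fun s => s.any (fun kv => kv.1 == "direction"))) = true
instance (sectors : List (List (String × String))) : Decidable (Pre_calculate_direction_py sectors) := by unfold Pre_calculate_direction_py; infer_instance

def pvWitness_calculate_direction_py : (List (List (String × String))) :=
  [[("direction", "positive")], [("direction", "neutral")]]

def Spec_calculate_direction_py (sectors : List (List (String × String))) (out : String) : Prop := out = calculate_direction_py_alt sectors
instance (sectors : List (List (String × String))) (out : String) : Decidable (Spec_calculate_direction_py sectors out) := by unfold Spec_calculate_direction_py; infer_instance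

-- ===== CLAIM =====
def Claim_equal_calculate_direction_py : Prop := ∀ (sectors : List (List (String × String))), Dom_calculate_direction_py sectors → Pre_calculate_direction_py sectors → Spec_calculate_direction_py sectors (calculate_direction_py sectors)

-- ===== LEMMAS AND PROOFS =====
-- The canonical stack for a signed balance b: |b| copies of the sign's name.
def cdRep (b : Int) : List String :=
  if 0 ≤ b then List.replicate b.toNat "positive" else List.replicate (-b).toNat "negative"

lemma cdRep_push_pos (b : Int) :
    (match cdRep b with
     | [] => ["positive"]
     | t :: rest => if (t == "positive") = false then rest else "positive" :: t :: rest)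
      = cdRep (b + 1) := by
  unfold cdRep
  rcases lt_trichotomy b 0 with h | h | h
  · obtain ⟨k, hk⟩ : ∃ k, (-b).toNat = k + 1 := ⟨(-b).toNat - 1, by omega⟩
    have h1 : ¬ 0 ≤ b := by omega
    by_cases h2 : 0 ≤ b + 1
    · have h3 : k = 0 := by omega
      have h4 : (b + 1).toNat = 0 := by omega
      simp [h1, h2, hk, h3, h4, List.replicate_succ]
    · have h3 : (-1 + -b).toNat = k := by omega
      simp [h1, h2, hk, h3, List.replicate_succ]
  · subst h; decide
  · obtain ⟨k, hk⟩ : ∃ k, b.toNat = k + 1 := ⟨b.toNat - 1, by omega⟩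
    have h1 : 0 ≤ b := by omega
    have h2 : 0 ≤ b + 1 := by omega
    have h3 : (b + 1).toNat = k + 2 := by omega
    simp [h1, h2, hk, h3, List.replicate_succ]

lemma cdRep_push_neg (b : Int) :
    (match cdRep b with
     | [] => ["negative"]
     | t :: rest => if (t == "negative") = false then rest else "negative" :: t :: rest)
      = cdRep (b - 1) := by
  unfold cdRep
  rcases lt_trichotomy b 0 with h | h | h
  · obtain ⟨k, hk⟩ : ∃ k, (-b).toNat = k + 1 := ⟨(-b).toNat - 1, by omega⟩
    have h1 : ¬ 0 ≤ b := by omega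
    have h2 : ¬ 1 ≤ b := by omega
    have h3 : (1 - b).toNat = k + 2 := by omega
    simp [h1, h2, hk, h3, List.replicate_succ]
  · subst h; decide
  · obtain ⟨k, hk⟩ : ∃ k, b.toNat = k + 1 := ⟨b.toNat - 1, by omega⟩
    have h1 : 0 ≤ b := by omega
    by_cases h2 : 0 ≤ b - 1
    · have h2' : 1 ≤ b := by omega
      have h3 : (b.toNat - 1) = k := by omega
      simp [h1, h2', hk, h3, List.replicate_succ]
    · have h2' : 1 ≤ b := by omega
      have h3 : k = 0 := by omega
      have h4 : (b.toNat - 1) = 0 := by omega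
      simp [h1, h2', hk, h3, List.replicate_succ]

lemma cdStep_rep (b : Int) (s : List (String × String)) :
    cdStep (cdRep b) s =
      cdRep (b + (if pyDirD s == "positive" then 1 else 0)
               - (if pyDirD s == "negative" then 1 else 0)) := by
  by_cases hp : pyDirD s == "positive"
  · rw [beq_iff_eq] at hp
    unfold cdStep
    rw [hp]
    simpa using cdRep_push_pos b
  · by_cases hn : pyDirD s == "negative"
    · rw [beq_iff_eq] at hn
      unfold cdStep
      rw [hn]
      have : b + 0 - 1 = b - 1 := by omega
      simpa [this] using cdRep_push_neg b
    · unfold cdStep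
      simp [hp, hn]

lemma cd_fold_rep (sectors : List (List (String × String))) (b : Int) :
    sectors.foldl cdStep (cdRep b) =
      cdRep (b + (sectors.map (fun s => if pyDirD s == "positive" then (1:Int) else 0)).sum
               - (sectors.map (fun s => if pyDirD s == "negative" then (1:Int) else 0)).sum) := by
  induction sectors generalizing b with
  | nil => simp
  | cons s rest ih =>
    simp only [List.foldl_cons, List.map_cons, List.sum_cons, cdStep_rep, ih]
    ring_nf

lemma cdRep_head (z : Int) :
    (match cdRep z with
     | [] => "neutral"
     | t :: _ => t) = (if z > 0 then "positive" else if z < 0 then "negative" else "neutral") := by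
  unfold cdRep
  rcases lt_trichotomy z 0 with h | h | h
  · have h1 : ¬ 0 ≤ z := by omega
    have h2 : (-z).toNat = ((-z).toNat - 1) + 1 := by omega
    rw [if_neg h1, h2, List.replicate_succ]
    simp [show ¬ z > 0 by omega, h]
  · simp [h]
  · have h1 : 0 ≤ z := by omega
    have h2 : z.toNat = (z.toNat - 1) + 1 := by omega
    rw [if_pos h1, h2, List.replicate_succ]
    simp [h]

-- ===== VERDICT =====
theorem calculate_direction_py_spec : Claim_equal_calculate_direction_py := by
  intro sectors _ _
  unfold Spec_calculate_direction_py calculate_direction_py calculate_direction_py_alt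
  have h0 : ([] : List String) = cdRep 0 := by decide
  rw [h0, cd_fold_rep, cdRep_head]
  rcases sectors with _ | ⟨s, rest⟩
  · simp
  · simp only [if_neg (List.cons_ne_nil s rest), Int.zero_add]
    set P := (((s :: rest).map (fun s => if pyDirD s == "positive" then (1:Int) else 0)).sum) with hP
    set N := (((s :: rest).map (fun s => if pyDirD s == "negative" then (1:Int) else 0)).sum) with hN
    by_cases h1 : P > N <;> by_cases h2 : N > P <;>
      simp [h1, h2, show (P - N < 0) ↔ N > P by omega]
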